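-- pv_equiv track=rewrite | github.com/pypi-data/pypi-mirror-236 | packages/ezptn/ezptn-0.0.1.tar.gz/ezptn-0.0.1/ezptn/__init__.py | list_match
-- ===== SOURCE A (Python) =====
-- def list_match(sep_ls, target_str):
-- 	# セパレータが空の場合 (再帰終了条件)
-- 	if len(sep_ls) == 0: return [(target_str,)]
-- 	# 冒頭のセパレータ
-- 	head_sep = sep_ls[0]
-- 	# セパレータを順に見ていく
-- 	div_ls = target_str.split(head_sep)
-- 	if len(div_ls) == 1: return []	# セパレータが入っていない場合は「マッチしない」
-- 	ret_ls = []
-- 	for i in range(len(div_ls) - 1):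
-- 		left = head_sep.join(div_ls[:i+1])
-- 		right = head_sep.join(div_ls[i+1:])
-- 		# 再帰呼び出しして追記
-- 		for e in list_match(sep_ls[1:], right):
-- 			ret_ls.append((left,) + e)
-- 	return ret_ls
-- ===== SOURCE B (Python) =====
-- def list_match(sep_ls, target_str):
--     # Iterative worklist of (prefix_tuple, remaining_suffix) instead of recursion.
--     work = [((), target_str)]
--     for sep in sep_ls:
--         new_work = []
--         for prefix, rem in work:
--             div = rem.split(sep)
--             if len(div) > 1:
--                 new_work += [(prefix + (sep.join(div[:i + 1]),), sep.join(div[i + 1:]))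
--                              for i in range(len(div) - 1)]
--         work = new_work
--     return [prefix + (rem,) for prefix, rem in work]
-- ===== Notes on version B (the rewrite author's own statement) =====
-- stated objective: alternative
-- what changed: Replaced A's recursion over the separator list by an iterative fold over separators maintaining a worklist of (prefix, remaining-suffix) pairs, extended breadth-first.
-- outside the precondition, e.g. on list_match(['a', 'b', ''], 'ba'): A returns [], B returns []
import Mathlib
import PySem

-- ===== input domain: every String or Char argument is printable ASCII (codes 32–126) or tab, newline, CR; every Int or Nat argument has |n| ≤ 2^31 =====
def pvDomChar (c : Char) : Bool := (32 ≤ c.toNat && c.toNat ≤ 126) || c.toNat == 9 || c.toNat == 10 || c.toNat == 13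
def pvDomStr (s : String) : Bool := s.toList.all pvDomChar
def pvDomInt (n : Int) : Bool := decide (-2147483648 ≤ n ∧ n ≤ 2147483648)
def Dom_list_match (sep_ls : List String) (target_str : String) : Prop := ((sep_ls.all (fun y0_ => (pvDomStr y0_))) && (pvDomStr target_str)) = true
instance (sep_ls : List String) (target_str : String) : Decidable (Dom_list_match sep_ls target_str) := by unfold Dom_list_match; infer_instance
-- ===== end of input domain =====

-- B replaces A's recursion on the separator list by an iterative worklist of
-- (prefix, remaining-suffix) pairs; same return value on Pre_, no side effects.

-- ===== PORT A =====
def list_match (sep_ls : List String) (target_str : String) : List (List String) :=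
  match sep_ls with
  | [] => [[target_str]]
  | head_sep :: rest =>
    -- target_str.split(head_sep): split? is none only for head_sep = "", excluded by Pre_ (ValueError)
    let div_ls := (PySem.Str.split? target_str head_sep).getD [target_str]
    if div_ls.length == 1 then []
    else
      (List.range (div_ls.length - 1)).foldl (fun ret_ls i =>
        let left := PySem.Str.join head_sep (PySem.List.slice div_ls none (some ((i : Int) + 1)))
        let right := PySem.Str.join head_sep (PySem.List.slice div_ls (some ((i : Int) + 1)) none)
        ret_ls ++ (list_match rest right).map (fun e => left :: e)) []

-- ===== PORT B =====
def list_match_alt (sep_ls : List String) (target_str : String) : List (List String) :=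
  let work := sep_ls.foldl (fun work sep =>
    work.foldl (fun new_work pr =>
      -- rem.split(sep): split? is none only for sep = "", excluded by Pre_ (ValueError)
      let div := (PySem.Str.split? pr.2 sep).getD [pr.2]
      if div.length > 1 then
        new_work ++ (List.range (div.length - 1)).map (fun i =>
          (pr.1 ++ [PySem.Str.join sep (PySem.List.slice div none (some ((i : Int) + 1)))],
           PySem.Str.join sep (PySem.List.slice div (some ((i : Int) + 1)) none)))
      else new_work) [])
    [(([] : List String), target_str)]
  work.map (fun pr => pr.1 ++ [pr.2])

-- ===== PRECONDITION & SPEC =====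
-- Pre_ excludes inputs whose empty separator can be reached by the evaluation, where str.split("") raises
-- ValueError in both A and B; the reachability test (some earlier separator absent from target_str) is
-- conservative, so a few inputs on which A returns [] are excluded too (see claim cites).
def Pre_list_match (sep_ls : List String) (target_str : String) : Prop :=
  "" ∉ sep_ls ∨ ∃ s ∈ sep_ls.take (sep_ls.idxOf ""), PySem.Str.isIn s target_str = false
instance (sep_ls : List String) (target_str : String) : Decidable (Pre_list_match sep_ls target_str) := by unfold Pre_list_match; infer_instance
def pvWitness_list_match : List String × String := (["-", ","], "a-b,c-d")

def Spec_list_match (sep_ls : List String) (target_str : String) (out : List (List String)) : Prop := out = list_match_alt sep_ls target_str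
instance (sep_ls : List String) (target_str : String) (out : List (List String)) : Decidable (Spec_list_match sep_ls target_str out) := by unfold Spec_list_match; infer_instance

-- ===== CLAIM (what is proved, stated in full; the proofs are below) =====
def Claim_equal_list_match : Prop := ∀ (sep_ls : List String) (target_str : String), Dom_list_match sep_ls target_str → Pre_list_match sep_ls target_str → Spec_list_match sep_ls target_str (list_match sep_ls target_str)

-- ===== LEMMAS AND PROOFS =====

-- the list of (left, right) cut pairs for one separator: the shape shared by both ports
def pvCuts (sep t : String) : List (String × String) :=
  let div := (PySem.Str.split? t sep).getD [t]
  if div.length ≤ 1 then []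
  else (List.range (div.length - 1)).map (fun i =>
    (PySem.Str.join sep (PySem.List.slice div none (some ((i : Int) + 1))),
     PySem.Str.join sep (PySem.List.slice div (some ((i : Int) + 1)) none)))

theorem list_match_cons (sep : String) (rest : List String) (t : String) :
    list_match (sep :: rest) t
      = (pvCuts sep t).flatMap (fun lr => (list_match rest lr.2).map (fun e => lr.1 :: e)) := by
  simp only [list_match, pvCuts]
  set div := (PySem.Str.split? t sep).getD [t] with hdiv
  by_cases h : div.length = 1
  · simp [h]
  · by_cases h0 : div.length = 0
    · simp [h0]
    · have h2 : ¬ div.length ≤ 1 := by omega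
      simp only [beq_iff_eq, h, if_false, h2, if_false,
        PySem.List.foldl_append_eq_flatMap, List.flatMap_map, List.nil_append]

theorem alt_step_eq (work : List (List String × String)) (sep : String) :
    work.foldl (fun new_work pr =>
      let div := (PySem.Str.split? pr.2 sep).getD [pr.2]
      if div.length > 1 then
        new_work ++ (List.range (div.length - 1)).map (fun i =>
          (pr.1 ++ [PySem.Str.join sep (PySem.List.slice div none (some ((i : Int) + 1)))],
           PySem.Str.join sep (PySem.List.slice div (some ((i : Int) + 1)) none)))
      else new_work) []
    = work.flatMap (fun pr => (pvCuts sep pr.2).map (fun lr => (pr.1 ++ [lr.1], lr.2))) := by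
  have key : ∀ acc, work.foldl (fun new_work pr =>
      let div := (PySem.Str.split? pr.2 sep).getD [pr.2]
      if div.length > 1 then
        new_work ++ (List.range (div.length - 1)).map (fun i =>
          (pr.1 ++ [PySem.Str.join sep (PySem.List.slice div none (some ((i : Int) + 1)))],
           PySem.Str.join sep (PySem.List.slice div (some ((i : Int) + 1)) none)))
      else new_work) acc
      = acc ++ work.flatMap (fun pr => (pvCuts sep pr.2).map (fun lr => (pr.1 ++ [lr.1], lr.2))) := by
    induction work with
    | nil => simp
    | cons p ps ih =>
      intro acc
      simp only [List.foldl_cons, List.flatMap_cons, ih]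
      by_cases h : ((PySem.Str.split? p.2 sep).getD [p.2]).length > 1
      · simp [pvCuts, Nat.not_le_of_lt h, h, List.map_map, Function.comp_def, List.append_assoc]
      · have h2 : ((PySem.Str.split? p.2 sep).getD [p.2]).length ≤ 1 := Nat.le_of_not_lt h
        simp [pvCuts, h, h2]
  simpa using key []

theorem worklist_invariant (sep_ls : List String) (work : List (List String × String)) :
    (sep_ls.foldl (fun work sep =>
      work.foldl (fun new_work pr =>
        let div := (PySem.Str.split? pr.2 sep).getD [pr.2]
        if div.length > 1 then
          new_work ++ (List.range (div.length - 1)).map (fun i =>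
            (pr.1 ++ [PySem.Str.join sep (PySem.List.slice div none (some ((i : Int) + 1)))],
             PySem.Str.join sep (PySem.List.slice div (some ((i : Int) + 1)) none)))
        else new_work) []) work).map (fun pr => pr.1 ++ [pr.2])
    = work.flatMap (fun pr => (list_match sep_ls pr.2).map (fun e => pr.1 ++ e)) := by
  induction sep_ls generalizing work with
  | nil =>
    induction work with
    | nil => simp
    | cons p ps ihw => simp_all [list_match]
  | cons sep rest ih =>
    rw [List.foldl_cons, ih, alt_step_eq, List.flatMap_assoc]
    congr 1
    funext pr
    rw [list_match_cons, List.flatMap_map, List.map_flatMap]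
    congr 1
    funext lr
    simp [List.map_map, Function.comp_def]

-- ===== VERDICT (by name: the statement is the Claim_ definition above) =====
theorem list_match_spec : Claim_equal_list_match := by
  intro sep_ls target_str _ _
  unfold Spec_list_match list_match_alt
  rw [worklist_invariant]
  simp
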